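-- pv_equiv track=rewrite | github.com/RamananVr/Leetcodepython | arrays/2805_unknown_title.py | sumOddAfterQueries
-- ===== SOURCE A (Python) =====
-- def sumOddAfterQueries(nums, queries):
--     # Calculate the initial sum of odd numbers
--     odd_sum = sum(num for num in nums if num % 2 != 0)
--     result = []
--
--     for val, index in queries:
--         # Check if the current number at index is odd
--         if nums[index] % 2 != 0:
--             odd_sum -= nums[index]  # Remove it from the odd sum
--
--         # Update the number at the index
--         nums[index] += val
--
--         # Check if the updated number is odd
--         if nums[index] % 2 != 0:
--             odd_sum += nums[index]  # Add it to the odd sum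
--
--         # Append the current odd sum to the result
--         result.append(odd_sum)
--
--     return result
-- ===== SOURCE B (Python) =====
-- def sumOddAfterQueries(nums, queries):
--     result = []
--     for val, index in queries:
--         nums[index] += val
--         result.append(sum(x for x in nums if x % 2 != 0))
--     return result
-- ===== Notes on version B (the rewrite author's own statement) =====
-- stated objective: simpler
-- what changed: B drops A's incrementally maintained odd-sum accumulator and instead rescans the whole array after each update, summing the odd entries fresh (O(n) per query instead of O(1)); both mutate nums in place identically.
import Mathlib
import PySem

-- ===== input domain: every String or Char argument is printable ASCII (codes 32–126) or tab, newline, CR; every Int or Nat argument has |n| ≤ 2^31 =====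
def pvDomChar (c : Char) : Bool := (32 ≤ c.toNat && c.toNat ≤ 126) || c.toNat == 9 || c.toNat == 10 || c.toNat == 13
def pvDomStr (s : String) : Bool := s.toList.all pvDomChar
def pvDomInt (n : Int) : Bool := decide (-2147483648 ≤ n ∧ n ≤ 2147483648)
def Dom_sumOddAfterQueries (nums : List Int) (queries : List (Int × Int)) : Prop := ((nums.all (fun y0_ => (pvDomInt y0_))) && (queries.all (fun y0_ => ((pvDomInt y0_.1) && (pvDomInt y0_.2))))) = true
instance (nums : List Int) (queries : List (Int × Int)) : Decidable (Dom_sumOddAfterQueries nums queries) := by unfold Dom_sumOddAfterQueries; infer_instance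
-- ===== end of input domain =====

-- B replaces A's O(1)-per-query incremental odd-sum accumulator with a full rescan of the
-- (in-place updated) array after each query; equivalence of the RETURN values is proved —
-- both versions mutate nums identically in Python, which the caller can observe.

-- ===== PORT A =====
-- A's per-query step: state = (current nums, running odd_sum, result so far).
def pvStepA (st : List Int × Int × List Int) (q : Int × Int) : List Int × Int × List Int :=
  let ns := st.1
  let os := st.2.1
  let res := st.2.2
  let val := q.1
  let index := q.2
  let cur := PySem.List.pyGetD ns index 0
  let os1 := if PySem.Int.mod cur 2 ≠ 0 then os - cur else os
  let ns' := PySem.List.pySetD ns index (cur + val)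
  let new := PySem.List.pyGetD ns' index 0
  let os2 := if PySem.Int.mod new 2 ≠ 0 then os1 + new else os1
  (ns', os2, res ++ [os2])

def sumOddAfterQueries (nums : List Int) (queries : List (Int × Int)) : List Int :=
  -- odd_sum = sum(num for num in nums if num % 2 != 0)
  let odd_sum := nums.foldl (fun s n => if PySem.Int.mod n 2 ≠ 0 then s + n else s) 0
  (queries.foldl pvStepA (nums, odd_sum, [])).2.2

-- ===== PORT B =====
-- sum(x for x in ns if x % 2 != 0), computed fresh each query
def pvOddSum (ns : List Int) : Int := (ns.filter (fun x => decide (PySem.Int.mod x 2 ≠ 0))).sum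

def pvStepB (st : List Int × List Int) (q : Int × Int) : List Int × List Int :=
  let ns' := PySem.List.pySetD st.1 q.2 (PySem.List.pyGetD st.1 q.2 0 + q.1)
  (ns', st.2 ++ [pvOddSum ns'])

def sumOddAfterQueries_alt (nums : List Int) (queries : List (Int × Int)) : List Int :=
  (queries.foldl pvStepB (nums, [])).2

-- ===== PRECONDITION & SPEC =====
-- Pre_ excludes exactly the queries whose index is out of range, where Python A raises IndexError.
def Pre_sumOddAfterQueries (nums : List Int) (queries : List (Int × Int)) : Prop :=
  ∀ q ∈ queries, PySem.Raise.InRange nums.length q.2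
instance (nums : List Int) (queries : List (Int × Int)) : Decidable (Pre_sumOddAfterQueries nums queries) := by unfold Pre_sumOddAfterQueries; infer_instance

def pvWitness_sumOddAfterQueries : List Int × (List (Int × Int)) := ([1, 2, 3, 4], [(1, 0), (-3, 1), (-4, 0), (2, 3)])

def Spec_sumOddAfterQueries (nums : List Int) (queries : List (Int × Int)) (out : List Int) : Prop := out = sumOddAfterQueries_alt nums queries
instance (nums : List Int) (queries : List (Int × Int)) (out : List Int) : Decidable (Spec_sumOddAfterQueries nums queries out) := by unfold Spec_sumOddAfterQueries; infer_instance

-- ===== CLAIM (what is proved, stated in full; the proofs are below) =====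
def Claim_equal_sumOddAfterQueries : Prop := ∀ (nums : List Int) (queries : List (Int × Int)), Dom_sumOddAfterQueries nums queries → Pre_sumOddAfterQueries nums queries → Spec_sumOddAfterQueries nums queries (sumOddAfterQueries nums queries)

-- ===== LEMMAS AND PROOFS =====

theorem pvWitness_ok : Dom_sumOddAfterQueries pvWitness_sumOddAfterQueries.1 pvWitness_sumOddAfterQueries.2 ∧ Pre_sumOddAfterQueries pvWitness_sumOddAfterQueries.1 pvWitness_sumOddAfterQueries.2 := by
  constructor
  · decide
  · unfold Pre_sumOddAfterQueries; decide

-- an in-range Python index resolves to a Nat index < length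
theorem pvIdx_of_inRange (n : Nat) (i : Int) (h : PySem.Raise.InRange n i) :
    ∃ k : Nat, k < n ∧ PySem.List.pyIdx? n i = some k := by
  obtain ⟨h1, h2⟩ := h
  unfold PySem.List.pyIdx?
  by_cases h0 : 0 ≤ i
  · exact ⟨i.toNat, by omega, by simp [h0, h2]⟩
  · refine ⟨n - (-i).toNat, by omega, ?_⟩
    simp [h0, h1]

theorem pvGetD_idx {α : Type} (xs : List α) (i : Int) (d : α) (k : Nat)
    (hk : PySem.List.pyIdx? xs.length i = some k) (hlt : k < xs.length) :
    PySem.List.pyGetD xs i d = xs[k] := by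
  simp [PySem.List.pyGetD, PySem.List.pyGet?, hk, List.getElem?_eq_getElem hlt]

theorem pvSetD_idx {α : Type} (xs : List α) (i : Int) (v : α) (k : Nat)
    (hk : PySem.List.pyIdx? xs.length i = some k) :
    PySem.List.pySetD xs i v = xs.set k v := by
  simp [PySem.List.pySetD, PySem.List.pySet?, hk]

-- effect of one write on the sum of the entries kept by a filter
theorem pvFilterSum_set (c : Int → Bool) (ns : List Int) (k : Nat) (v : Int) (hk : k < ns.length) :
    ((ns.set k v).filter c).sum =
      (ns.filter c).sum - (if c ns[k] then ns[k] else 0) + (if c v then v else 0) := by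
  induction ns generalizing k with
  | nil => simp at hk
  | cons a t ih =>
    cases k with
    | zero =>
      simp only [List.set_cons_zero, List.filter_cons, List.getElem_cons_zero]
      cases ha : c a <;> cases hv : c v <;>
        simp only [Bool.false_eq_true, if_false, if_true, List.sum_cons] <;> ring
    | succ k =>
      have hk' : k < t.length := by simpa using hk
      simp only [List.set_cons_succ, List.filter_cons, List.getElem_cons_succ]
      cases ha : c a <;>
        simp only [Bool.false_eq_true, if_false, if_true, List.sum_cons, ih k hk']; ring

-- the loop invariant: A's state carries B's nums, the odd sum of B's nums, and B's result
theorem pvLoop_eq (qs : List (Int × Int)) (ns : List Int) (acc : List Int)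
    (h : ∀ q ∈ qs, PySem.Raise.InRange ns.length q.2) :
    (qs.foldl pvStepA (ns, pvOddSum ns, acc)).2.2 = (qs.foldl pvStepB (ns, acc)).2 := by
  induction qs generalizing ns acc with
  | nil => rfl
  | cons q qs ih =>
    obtain ⟨k, hlt, hidx⟩ := pvIdx_of_inRange ns.length q.2 (h q (by simp))
    have hget := pvGetD_idx ns q.2 (0 : Int) k hidx hlt
    have hset := pvSetD_idx ns q.2 (ns[k] + q.1) k hidx
    have hlen : (PySem.List.pySetD ns q.2 (PySem.List.pyGetD ns q.2 0 + q.1)).length = ns.length :=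
      PySem.List.length_pySetD _ _ _
    have hget' : PySem.List.pyGetD (PySem.List.pySetD ns q.2 (PySem.List.pyGetD ns q.2 0 + q.1)) q.2 (0 : Int) = ns[k] + q.1 := by
      rw [hget, hset]
      have hidx' : PySem.List.pyIdx? (ns.set k (ns[k] + q.1)).length q.2 = some k := by
        simpa using hidx
      rw [pvGetD_idx _ q.2 0 k hidx' (by simpa using hlt)]
      simp [List.getElem_set_self]
    have hos : (if PySem.Int.mod (PySem.List.pyGetD (PySem.List.pySetD ns q.2 (PySem.List.pyGetD ns q.2 0 + q.1)) q.2 0) 2 ≠ 0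
          then (if PySem.Int.mod (PySem.List.pyGetD ns q.2 0) 2 ≠ 0 then pvOddSum ns - PySem.List.pyGetD ns q.2 0 else pvOddSum ns)
                + PySem.List.pyGetD (PySem.List.pySetD ns q.2 (PySem.List.pyGetD ns q.2 0 + q.1)) q.2 0
          else (if PySem.Int.mod (PySem.List.pyGetD ns q.2 0) 2 ≠ 0 then pvOddSum ns - PySem.List.pyGetD ns q.2 0 else pvOddSum ns))
        = pvOddSum (PySem.List.pySetD ns q.2 (PySem.List.pyGetD ns q.2 0 + q.1)) := by
      rw [hget', hget, hset]
      unfold pvOddSum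
      rw [pvFilterSum_set _ ns k (ns[k] + q.1) hlt]
      simp only [decide_eq_true_eq]
      split_ifs <;> ring
    show (qs.foldl pvStepA (pvStepA (ns, pvOddSum ns, acc) q)).2.2 = _
    rw [show pvStepA (ns, pvOddSum ns, acc) q =
        (PySem.List.pySetD ns q.2 (PySem.List.pyGetD ns q.2 0 + q.1),
         pvOddSum (PySem.List.pySetD ns q.2 (PySem.List.pyGetD ns q.2 0 + q.1)),
         acc ++ [pvOddSum (PySem.List.pySetD ns q.2 (PySem.List.pyGetD ns q.2 0 + q.1))]) from by
      simp only [pvStepA]; rw [hos]]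
    rw [ih _ _ (fun p hp => by rw [hlen]; exact h p (by simp [hp]))]
    rfl

-- A's generator-sum initialisation computes pvOddSum
theorem pvInit_eq (ns : List Int) (s : Int) :
    ns.foldl (fun s n => if PySem.Int.mod n 2 ≠ 0 then s + n else s) s = s + pvOddSum ns := by
  induction ns generalizing s with
  | nil => simp [pvOddSum]
  | cons a t ih =>
    simp only [List.foldl_cons, pvOddSum, List.filter_cons, decide_eq_true_eq]
    by_cases h : PySem.Int.mod a 2 ≠ 0
    · rw [if_pos h, if_pos h, ih]
      simp only [List.sum_cons, pvOddSum]; ring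
    · rw [if_neg h, if_neg h, ih]
      simp only [pvOddSum]

-- ===== VERDICT (by name: the statement is the Claim_ definition above) =====
theorem sumOddAfterQueries_spec : Claim_equal_sumOddAfterQueries := by
  intro nums queries _ hpre
  unfold Spec_sumOddAfterQueries sumOddAfterQueries sumOddAfterQueries_alt
  have h0 : nums.foldl (fun s n => if PySem.Int.mod n 2 ≠ 0 then s + n else s) 0 = pvOddSum nums := by
    simpa using pvInit_eq nums 0
  rw [h0]
  exact pvLoop_eq queries nums [] hpre
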